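-- pv_equiv track=rewrite | github.com/chengzhi666/pythonAquaculture | fish_intel_mvp/jobs/refresh_taobao_cookie.py | _build_cookie_string
-- ===== SOURCE A (Python) =====
-- TAOBAO_COOKIE_PRIORITY = (
--     "_m_h5_tk",
--     "_m_h5_tk_enc",
--     "cookie2",
--     "t",
--     "_tb_token_",
--     "cna",
-- )
--
-- def _build_cookie_string(cookie_map: dict[str, str]) -> str:
--     keys: list[str] = []
--     seen = set()
--
--     for name in TAOBAO_COOKIE_PRIORITY:
--         if name in cookie_map and name not in seen:
--             keys.append(name)
--             seen.add(name)
--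
--     for name in sorted(cookie_map):
--         if name in seen:
--             continue
--         keys.append(name)
--         seen.add(name)
--
--     return "; ".join(f"{name}={cookie_map[name]}" for name in keys)
-- ===== SOURCE B (Python) =====
-- TAOBAO_COOKIE_PRIORITY = (
--     "_m_h5_tk",
--     "_m_h5_tk_enc",
--     "cookie2",
--     "t",
--     "_tb_token_",
--     "cna",
-- )
--
-- def _build_cookie_string(cookie_map: dict[str, str]) -> str:
--     rank = {name: i for i, name in enumerate(TAOBAO_COOKIE_PRIORITY)}
--     fallback = len(TAOBAO_COOKIE_PRIORITY)
--     ordered = sorted(cookie_map, key=lambda n: (rank.get(n, fallback), n))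
--     return "; ".join(f"{n}={cookie_map[n]}" for n in ordered)
-- ===== Notes on version B (the rewrite author's own statement) =====
-- stated objective: simpler
-- what changed: Replaces A's two ordering passes (a priority loop guarded by a seen-set, then a loop over the sorted remainder) with a rank table built once and a single sort of all keys by the composite key (rank.get(name, fallback), name).
import Mathlib
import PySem

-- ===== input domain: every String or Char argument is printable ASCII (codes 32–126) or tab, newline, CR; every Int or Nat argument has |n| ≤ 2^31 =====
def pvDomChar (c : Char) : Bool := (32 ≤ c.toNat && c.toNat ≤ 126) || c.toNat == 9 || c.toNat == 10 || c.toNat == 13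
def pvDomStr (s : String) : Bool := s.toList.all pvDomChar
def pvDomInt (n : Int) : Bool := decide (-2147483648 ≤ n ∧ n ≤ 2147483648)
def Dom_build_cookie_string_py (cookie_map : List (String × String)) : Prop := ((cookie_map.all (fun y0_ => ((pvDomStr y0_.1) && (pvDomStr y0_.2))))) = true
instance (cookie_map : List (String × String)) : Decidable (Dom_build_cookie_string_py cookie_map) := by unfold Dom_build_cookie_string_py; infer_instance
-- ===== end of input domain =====

-- B replaces A's two passes (priority loop with a seen-set, then a sorted-rest loop) by one
-- composite-key sort over a rank table; same return value, objective: simpler decomposition.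

def pvPRI : List String :=
  ["_m_h5_tk", "_m_h5_tk_enc", "cookie2", "t", "_tb_token_", "cna"]

-- ===== PORT A =====
-- cookie_map[name] is looked up with getD "": every name in `keys` is a key of the dict
-- (checked by `contains` in the first loop, drawn from the keys in the second), so the
-- default is never used and the port is exact (no KeyError is reachable).
def build_cookie_string_py (cookie_map : List (String × String)) : String :=
  let d : PySem.Dict String String := PySem.Dict.ofList cookie_map
  let st1 : List String × PySem.Set String :=
    pvPRI.foldl (fun st name =>
      if d.contains name && !(PySem.Set.contains st.2 name)
      then (st.1 ++ [name], PySem.Set.add st.2 name) else st) ([], PySem.Set.empty)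
  let st2 : List String × PySem.Set String :=
    (PySem.List.sorted d.keys (fun n => n)).foldl (fun st name =>
      if PySem.Set.contains st.2 name then st
      else (st.1 ++ [name], PySem.Set.add st.2 name)) st1
  PySem.Str.join "; " (st2.1.map (fun name => name ++ "=" ++ d.getD name ""))

-- ===== PORT B =====
-- rank = {name: i for i, name in enumerate(TAOBAO_COOKIE_PRIORITY)}
def pvRankDict : PySem.Dict String Int :=
  (PySem.List.enumerate pvPRI).foldl (fun r p => r.insert p.2 p.1) PySem.Dict.empty

-- Python's tuple key (rank.get(n, fallback), n) compares lexicographically on homogeneous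
-- components; ported as the key `toLex (rank, n) : Lex (Int × String)`, which is exactly
-- that lexicographic order, so `sorted` with this key is exact.
def build_cookie_string_py_alt (cookie_map : List (String × String)) : String :=
  let d : PySem.Dict String String := PySem.Dict.ofList cookie_map
  let fallback : Int := (pvPRI.length : Int)
  let ordered : List String :=
    PySem.List.sorted d.keys (fun n => (toLex (pvRankDict.getD n fallback, n) : Lex (Int × String)))
  PySem.Str.join "; " (ordered.map (fun n => n ++ "=" ++ d.getD n ""))

-- ===== PRECONDITION & SPEC =====
def Spec_build_cookie_string_py (cookie_map : List (String × String)) (out : String) : Prop := out = build_cookie_string_py_alt cookie_map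
instance (cookie_map : List (String × String)) (out : String) : Decidable (Spec_build_cookie_string_py cookie_map out) := by unfold Spec_build_cookie_string_py; infer_instance

-- ===== CLAIM (what is proved, stated in full; the proofs are below) =====
def Claim_equal_build_cookie_string_py : Prop := ∀ (cookie_map : List (String × String)), Dom_build_cookie_string_py cookie_map → Spec_build_cookie_string_py cookie_map (build_cookie_string_py cookie_map)

-- ===== LEMMAS AND PROOFS =====

-- A's first loop over a nodup list with seen = the accumulated keys is just a filter.
lemma pvLoop1 (d : PySem.Dict String String) :
    ∀ (l acc : List String), (acc ++ l).Nodup →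
      l.foldl (fun st name =>
          if d.contains name && !(PySem.Set.contains st.2 name)
          then (st.1 ++ [name], PySem.Set.add st.2 name) else st) (acc, acc)
        = (acc ++ l.filter (fun n => d.contains n),
           acc ++ l.filter (fun n => d.contains n)) := by
  intro l
  induction l with
  | nil => intro acc h; simp
  | cons name t ih =>
    intro acc h
    have hna : name ∉ acc := fun hmem => (List.disjoint_of_nodup_append h hmem) (by simp)
    have hcon : PySem.Set.contains acc name = false := by
      rw [Bool.eq_false_iff]
      intro hc
      exact hna ((PySem.Set.contains_iff _ _).mp hc)
    simp only [List.foldl_cons]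
    by_cases hdc : d.contains name = true
    · have hcond : (d.contains name && !(PySem.Set.contains acc name)) = true := by
        rw [hdc, hcon]; rfl
      rw [hcond, if_pos rfl, PySem.Set.add_of_not_mem hna]
      have h' : ((acc ++ [name]) ++ t).Nodup := by
        have e : acc ++ name :: t = (acc ++ [name]) ++ t := by simp
        rw [e] at h; exact h
      rw [ih (acc ++ [name]) h']
      simp [hdc]
    · have hd' : d.contains name = false := by simpa using hdc
      have hcond : (d.contains name && !(PySem.Set.contains acc name)) = false := by
        rw [hd']; rfl
      rw [hcond, if_neg (by simp)]
      have h' : (acc ++ t).Nodup := (((List.sublist_cons_self name t).append_left acc).nodup) h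
      rw [ih acc h']
      simp [hd']

-- A's second loop: with seen already containing exactly the priority keys that were taken,
-- it appends the not-yet-seen names, i.e. filters out the priority names.
lemma pvLoop2 (p : String → Bool) :
    ∀ (l : List String) (keys0 : List String) (sn : PySem.Set String), l.Nodup →
      (∀ n ∈ l, PySem.Set.contains sn n = p n) →
      (l.foldl (fun st name =>
          if PySem.Set.contains st.2 name then st
          else (st.1 ++ [name], PySem.Set.add st.2 name)) (keys0, sn)).1
        = keys0 ++ l.filter (fun n => !p n) := by
  intro l
  induction l with
  | nil => intro keys0 sn _ _; simp
  | cons name t ih =>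
    intro keys0 sn hnd hsn
    have hnt : name ∉ t := (List.nodup_cons.mp hnd).1
    have htnd : t.Nodup := (List.nodup_cons.mp hnd).2
    have hc : PySem.Set.contains sn name = p name := hsn name (by simp)
    simp only [List.foldl_cons]
    by_cases hp : p name = true
    · rw [hc, hp, if_pos rfl]
      rw [ih keys0 sn htnd (fun n hn => hsn n (by simp [hn]))]
      simp [hp]
    · have hp' : p name = false := by simpa using hp
      rw [hc, hp', if_neg (by simp)]
      have hnmem : name ∉ sn := by
        intro hm
        have : PySem.Set.contains sn name = true := (PySem.Set.contains_iff _ _).mpr hm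
        rw [hc, hp'] at this; exact Bool.false_ne_true this
      have hsn' : ∀ n ∈ t, PySem.Set.contains (PySem.Set.add sn name) n = p n := by
        intro n hn
        have hne : n ≠ name := fun e => hnt (e ▸ hn)
        rw [PySem.Set.add_of_not_mem hnmem]
        have hx := hsn n (by simp [hn])
        cases hpx : p n with
        | true =>
          apply (PySem.Set.contains_iff _ _).mpr
          have : n ∈ sn := (PySem.Set.contains_iff sn n).mp (by rw [hx, hpx])
          simp at this ⊢
          exact Or.inl this
        | false =>
          rw [Bool.eq_false_iff]
          intro hcc
          have := (PySem.Set.contains_iff _ _).mp hcc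
          simp [hne] at this
          have : PySem.Set.contains sn n = true := (PySem.Set.contains_iff _ _).mpr this
          rw [hx, hpx] at this
          exact Bool.false_ne_true this
      rw [ih (keys0 ++ [name]) (PySem.Set.add sn name) htnd hsn']
      simp [hp']

lemma pvPRI_nodup : pvPRI.Nodup := by decide

lemma pvRank_mem_lt (a : String) (ha : a ∈ pvPRI) :
    pvRankDict.getD a (pvPRI.length : Int) < (pvPRI.length : Int) := by
  fin_cases ha <;> decide

lemma pvRank_not_mem (n : String) (h : n ∉ pvPRI) :
    pvRankDict.getD n (pvPRI.length : Int) = (pvPRI.length : Int) := by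
  simp [pvPRI] at h
  obtain ⟨h1, h2, h3, h4, h5, h6⟩ := h
  simp [pvRankDict, pvPRI, PySem.List.enumerate, PySem.Dict.getD, PySem.Dict.empty,
    PySem.Dict.insert, PySem.Dict.get?, PySem.Dict.contains,
    Ne.symm h1, Ne.symm h2, Ne.symm h3, Ne.symm h4, Ne.symm h5, Ne.symm h6]

lemma pvPRI_pairwise :
    pvPRI.Pairwise (fun a b =>
      (toLex (pvRankDict.getD a (pvPRI.length : Int), a) : Lex (Int × String))
        < toLex (pvRankDict.getD b (pvPRI.length : Int), b)) := by
  decide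

-- The ordered key list both programs produce: priority keys present, in priority order,
-- followed by the remaining keys in sorted order.
lemma pvKeys_eq (d : PySem.Dict String String) (hnd : d.keys.Nodup) :
    PySem.List.sorted d.keys
        (fun n => (toLex (pvRankDict.getD n (pvPRI.length : Int), n) : Lex (Int × String)))
      = pvPRI.filter (fun n => d.contains n)
        ++ (PySem.List.sorted d.keys (fun n => n)).filter (fun n => !decide (n ∈ pvPRI)) := by
  set P := pvPRI.filter (fun n => d.contains n) with hP
  set S := PySem.List.sorted d.keys (fun n => n) with hS
  set R := S.filter (fun n => !decide (n ∈ pvPRI)) with hR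
  have hSperm : S.Perm d.keys := PySem.List.sorted_perm _ _ _
  have hSnd : S.Nodup := hSperm.nodup_iff.mpr hnd
  have hPnd : P.Nodup := pvPRI_nodup.filter _
  have hRnd : R.Nodup := hSnd.filter _
  have hmemP : ∀ n, n ∈ P ↔ n ∈ pvPRI ∧ n ∈ d.keys := by
    intro n
    simp [hP, List.mem_filter, PySem.Dict.contains_iff_mem_keys]
  have hmemR : ∀ n, n ∈ R ↔ n ∈ d.keys ∧ n ∉ pvPRI := by
    intro n
    simp [hR, List.mem_filter, hSperm.mem_iff]
  apply PySem.List.sorted_eq_of_perm_of_pairwise_lt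
  · rw [List.perm_ext_iff_of_nodup _ hnd]
    · intro a
      constructor
      · intro h
        rcases List.mem_append.mp h with h | h
        · exact ((hmemP a).mp h).2
        · exact ((hmemR a).mp h).1
      · intro h
        by_cases hp : a ∈ pvPRI
        · exact List.mem_append.mpr (Or.inl ((hmemP a).mpr ⟨hp, h⟩))
        · exact List.mem_append.mpr (Or.inr ((hmemR a).mpr ⟨h, hp⟩))
    · rw [List.nodup_append]
      refine ⟨hPnd, hRnd, ?_⟩
      intro a ha b hb e
      exact ((hmemR b).mp hb).2 (e ▸ ((hmemP a).mp ha).1)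
  · rw [List.pairwise_append]
    refine ⟨List.Pairwise.filter _ pvPRI_pairwise, ?_, ?_⟩
    · have hle : S.Pairwise (fun a b : String => a ≤ b) := by
        simpa using PySem.List.sorted_pairwise d.keys (fun n => n)
      have hne : S.Pairwise (fun a b : String => a ≠ b) := hSnd
      have hlt : S.Pairwise (fun a b : String => a < b) :=
        (hle.and hne).imp (fun h => lt_of_le_of_ne h.1 h.2)
      refine (hlt.filter _).imp_of_mem ?_
      intro a b ha hb hab
      have hna : a ∉ pvPRI := by simpa using (List.mem_filter.mp ha).2
      have hnb : b ∉ pvPRI := by simpa using (List.mem_filter.mp hb).2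
      rw [Prod.Lex.lt_iff]
      right
      exact ⟨by simp [pvRank_not_mem a hna, pvRank_not_mem b hnb], hab⟩
    · intro a ha b hb
      have hpa : a ∈ pvPRI := (List.mem_filter.mp ha).1
      have hnb : b ∉ pvPRI := by simpa using (List.mem_filter.mp hb).2
      rw [Prod.Lex.lt_iff]
      left
      calc pvRankDict.getD a (pvPRI.length : Int) < (pvPRI.length : Int) := pvRank_mem_lt a hpa
        _ = pvRankDict.getD b (pvPRI.length : Int) := (pvRank_not_mem b hnb).symm

-- ===== VERDICT (by name: the statement is the Claim_ definition above) =====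
theorem build_cookie_string_py_spec : Claim_equal_build_cookie_string_py := by
  intro cookie_map _
  unfold Spec_build_cookie_string_py build_cookie_string_py build_cookie_string_py_alt
  set d : PySem.Dict String String := PySem.Dict.ofList cookie_map with hd
  have hnd : d.keys.Nodup := PySem.Dict.nodup_keys_ofList cookie_map
  have hSperm : (PySem.List.sorted d.keys (fun n => n)).Perm d.keys :=
    PySem.List.sorted_perm _ _ _
  have hSnd : (PySem.List.sorted d.keys (fun n => n)).Nodup := hSperm.nodup_iff.mpr hnd
  have hseen : ∀ n ∈ PySem.List.sorted d.keys (fun n => n),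
      PySem.Set.contains (pvPRI.filter (fun n => d.contains n)) n
        = (fun n => decide (n ∈ pvPRI)) n := by
    intro n hn
    have hkey : n ∈ d.keys := hSperm.mem_iff.mp hn
    have hcon : d.contains n = true := (PySem.Dict.contains_iff_mem_keys d n).mpr hkey
    by_cases hp : n ∈ pvPRI
    · simp [PySem.Set.contains, List.mem_filter, hp, hcon]
    · simp [PySem.Set.contains, List.mem_filter, hp]
  have h1 := pvLoop1 d pvPRI [] (by simpa using pvPRI_nodup)
  simp only [List.nil_append] at h1
  have h2 := pvLoop2 (fun n => decide (n ∈ pvPRI)) (PySem.List.sorted d.keys (fun n => n))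
    (pvPRI.filter (fun n => d.contains n)) (pvPRI.filter (fun n => d.contains n)) hSnd hseen
  have hstart : (PySem.Set.empty : PySem.Set String) = ([] : List String) := rfl
  simp only [hstart, h1, h2]
  rw [pvKeys_eq d hnd]
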